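-- pv_equiv track=rewrite | github.com/Clear20-22/CP-31-Sheet-TLE-Eliminators- | Codeforces Rating 1100/B. Kalindrome Array.py | check
-- ===== SOURCE A (Python) =====
-- def check(x: int, arr: list) -> bool:
--     l, r = 0, len(arr) - 1
--     while l < r:
--         while l < r and arr[l] == x:
--             l += 1
--         while l < r and arr[r] == x:
--             r -= 1
--         if arr[l] != arr[r]:
--             return False
--         l += 1
--         r -= 1
--     return True
-- ===== SOURCE B (Python) =====
-- def check(x: int, arr: list) -> bool:
--     b = [v for v in arr if v != x]
--     return b == b[::-1]
-- ===== Notes on version B (the rewrite author's own statement) =====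
-- stated objective: simpler
-- what changed: Replaces the in-place two-pointer skip-and-compare loop with two passes: filter out every occurrence of x, then test the remaining list for palindromy via b == b[::-1].
import Mathlib
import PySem

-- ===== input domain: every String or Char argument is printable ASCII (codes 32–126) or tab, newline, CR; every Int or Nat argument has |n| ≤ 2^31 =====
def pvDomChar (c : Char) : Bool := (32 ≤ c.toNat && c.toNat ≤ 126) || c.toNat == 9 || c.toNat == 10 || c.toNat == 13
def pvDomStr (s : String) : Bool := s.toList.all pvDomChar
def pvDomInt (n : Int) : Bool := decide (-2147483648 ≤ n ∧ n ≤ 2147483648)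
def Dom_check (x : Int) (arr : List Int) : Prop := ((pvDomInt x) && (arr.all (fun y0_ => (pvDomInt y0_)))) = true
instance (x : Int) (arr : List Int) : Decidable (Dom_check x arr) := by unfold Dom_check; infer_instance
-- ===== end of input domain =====

-- B replaces A's two-pointer skip-and-compare with filter-then-palindrome-test: simpler decomposition, same cost.

-- ===== PORT A =====
-- inner `while l < r and arr[l] == x: l += 1` (fuel-counted; fuel r - l bounds the iterations)
def checkSkipLGo (x : Int) (arr : List Int) (r : Int) : Nat → Int → Int
  | 0, l => l
  | fuel + 1, l =>
    if l < r ∧ PySem.List.pyGet? arr l = some x then checkSkipLGo x arr r fuel (l + 1) else l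

def checkSkipL (x : Int) (arr : List Int) (l r : Int) : Int :=
  checkSkipLGo x arr r (r - l).toNat l

-- inner `while l < r and arr[r] == x: r -= 1` (fuel-counted)
def checkSkipRGo (x : Int) (arr : List Int) (l : Int) : Nat → Int → Int
  | 0, r => r
  | fuel + 1, r =>
    if l < r ∧ PySem.List.pyGet? arr r = some x then checkSkipRGo x arr l fuel (r - 1) else r

def checkSkipR (x : Int) (arr : List Int) (l r : Int) : Int :=
  checkSkipRGo x arr l (r - l).toNat r

-- outer `while l < r: … if arr[l] != arr[r]: return False; l += 1; r -= 1`
-- (fuel-counted; fuel = len(arr) bounds the iterations since r - l shrinks each round)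
def checkLoopGo (x : Int) (arr : List Int) : Nat → Int → Int → Bool
  | 0, _, _ => true
  | fuel + 1, l, r =>
    if l < r then
      let l' := checkSkipL x arr l r
      let r' := checkSkipR x arr l' r
      if PySem.List.pyGet? arr l' ≠ PySem.List.pyGet? arr r' then false
      else checkLoopGo x arr fuel (l' + 1) (r' - 1)
    else true

def check (x : Int) (arr : List Int) : Bool :=
  checkLoopGo x arr arr.length 0 ((arr.length : Int) - 1)

-- ===== PORT B =====
-- b = [v for v in arr if v != x]; return b == b[::-1]   (b[::-1] ported as List.reverse)
def check_alt (x : Int) (arr : List Int) : Bool :=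
  let b := arr.filter (fun v => decide (v ≠ x))
  decide (b = b.reverse)

-- ===== PRECONDITION & SPEC =====
def Spec_check (x : Int) (arr : List Int) (out : Bool) : Prop := out = check_alt x arr
instance (x : Int) (arr : List Int) (out : Bool) : Decidable (Spec_check x arr out) := by unfold Spec_check; infer_instance

-- ===== CLAIM (what is proved, stated in full; the proofs are below) =====
def Claim_equal_check : Prop := ∀ (x : Int) (arr : List Int), Dom_check x arr → Spec_check x arr (check x arr)

-- ===== LEMMAS AND PROOFS =====

-- the (closed) segment arr[l..r] as a list
def pvSeg (arr : List Int) (l r : Nat) : List Int := (arr.drop l).take (r + 1 - l)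

theorem pvSeg_cons (arr : List Int) (l r : Nat) (h : l ≤ r) (hl : l < arr.length) :
    pvSeg arr l r = arr[l] :: pvSeg arr (l + 1) r := by
  unfold pvSeg
  rw [List.drop_eq_getElem_cons hl]
  have : r + 1 - l = (r - l) + 1 := by omega
  rw [this, List.take_succ_cons]
  have h2 : r + 1 - (l + 1) = r - l := by omega
  rw [h2]

theorem pvSeg_concat (arr : List Int) (l r : Nat) (h : l < r) (hr : r < arr.length) :
    pvSeg arr l r = pvSeg arr l (r - 1) ++ [arr[r]] := by
  unfold pvSeg
  have h1 : r + 1 - l = (r - l) + 1 := by omega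
  rw [h1, List.take_add_one]
  have h2 : (arr.drop l)[r - l]? = some arr[r] := by
    rw [List.getElem?_drop]
    have : l + (r - l) = r := by omega
    rw [this, List.getElem?_eq_getElem hr]
  rw [h2]
  have h3 : r - 1 + 1 - l = r - l := by omega
  rw [h3]
  simp

theorem pv_pal_iff (a b : Int) (s : List Int) :
    ((a :: (s ++ [b])) = (a :: (s ++ [b])).reverse) ↔ (a = b ∧ s = s.reverse) := by
  have hrev : (a :: (s ++ [b])).reverse = b :: (s.reverse ++ [a]) := by simp
  rw [hrev, List.cons.injEq]
  constructor
  · rintro ⟨h1, h2⟩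
    subst h1
    refine ⟨rfl, ?_⟩
    have := congrArg List.dropLast h2
    simpa using this
  · rintro ⟨h1, h2⟩
    subst h1
    rw [← h2]
    exact ⟨rfl, rfl⟩

theorem pv_pal_sandwich (a b : Int) (s : List Int) :
    decide ((a :: (s ++ [b])) = (a :: (s ++ [b])).reverse)
      = (decide (a = b) && decide (s = s.reverse)) := by
  by_cases hab : a = b
  · by_cases hs : s = s.reverse
    · rw [decide_eq_true ((pv_pal_iff a b s).mpr ⟨hab, hs⟩),
        decide_eq_true hab, decide_eq_true hs]
      rfl
    · rw [decide_eq_false (fun h => hs ((pv_pal_iff a b s).mp h).2),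
        decide_eq_false hs]
      simp
  · rw [decide_eq_false (fun h => hab ((pv_pal_iff a b s).mp h).1),
        decide_eq_false hab]
    simp

-- the inner while loops never move past a stopping state, whatever the fuel
theorem checkSkipLGo_stop (x : Int) (arr : List Int) (r : Int) (fuel : Nat) (l : Int)
    (h : ¬ (l < r ∧ PySem.List.pyGet? arr l = some x)) :
    checkSkipLGo x arr r fuel l = l := by
  cases fuel with
  | zero => rfl
  | succ f => rw [checkSkipLGo, if_neg h]

theorem checkSkipRGo_stop (x : Int) (arr : List Int) (l : Int) (fuel : Nat) (r : Int)
    (h : ¬ (l < r ∧ PySem.List.pyGet? arr r = some x)) :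
    checkSkipRGo x arr l fuel r = r := by
  cases fuel with
  | zero => rfl
  | succ f => rw [checkSkipRGo, if_neg h]

theorem checkSkipL_stop (x : Int) (arr : List Int) (l r : Int)
    (h : ¬ (l < r ∧ PySem.List.pyGet? arr l = some x)) :
    checkSkipL x arr l r = l := checkSkipLGo_stop x arr r _ l h

theorem checkSkipR_stop (x : Int) (arr : List Int) (l r : Int)
    (h : ¬ (l < r ∧ PySem.List.pyGet? arr r = some x)) :
    checkSkipR x arr l r = r := checkSkipRGo_stop x arr l _ r h

theorem checkSkipL_shift (x : Int) (arr : List Int) (l r : Int) (h : l < r)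
    (hx : PySem.List.pyGet? arr l = some x) :
    checkSkipL x arr l r = checkSkipL x arr (l + 1) r := by
  unfold checkSkipL
  have h1 : (r - l).toNat = (r - (l + 1)).toNat + 1 := by omega
  rw [h1, checkSkipLGo, if_pos ⟨h, hx⟩]

theorem checkSkipR_shift (x : Int) (arr : List Int) (l r : Int) (h : l < r)
    (hx : PySem.List.pyGet? arr r = some x) :
    checkSkipR x arr l r = checkSkipR x arr l (r - 1) := by
  unfold checkSkipR
  have h1 : (r - l).toNat = ((r - 1) - l).toNat + 1 := by omega
  rw [h1, checkSkipRGo, if_pos ⟨h, hx⟩]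

theorem checkLoopGo_true (x : Int) (arr : List Int) (fuel : Nat) (l r : Int)
    (h : ¬ l < r) : checkLoopGo x arr fuel l r = true := by
  cases fuel with
  | zero => rfl
  | succ f => rw [checkLoopGo, if_neg h]

-- one skip step on the left equals restarting the outer loop at l+1 (same fuel)
theorem checkLoop_stepL (x : Int) (arr : List Int) (fuel : Nat) (l r : Int) (h : l < r)
    (hx : PySem.List.pyGet? arr l = some x) :
    checkLoopGo x arr (fuel + 1) l r = checkLoopGo x arr (fuel + 1) (l + 1) r := by
  have hsk : checkSkipL x arr l r = checkSkipL x arr (l + 1) r :=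
    checkSkipL_shift x arr l r h hx
  by_cases h2 : l + 1 < r
  · rw [checkLoopGo, checkLoopGo, if_pos h, if_pos h2]
    dsimp only
    rw [hsk]
  · have hr : r = l + 1 := by omega
    subst hr
    rw [checkLoopGo, if_pos h, checkLoopGo_true x arr _ (l + 1) (l + 1) (by omega)]
    dsimp only
    have hl' : checkSkipL x arr l (l + 1) = l + 1 := by
      rw [hsk, checkSkipL_stop x arr (l + 1) (l + 1) (by simp)]
    rw [hl']
    have hr' : checkSkipR x arr (l + 1) (l + 1) = l + 1 :=
      checkSkipR_stop x arr (l + 1) (l + 1) (by simp)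
    rw [hr']
    simp [checkLoopGo_true x arr fuel (l + 1 + 1) l (by omega)]

-- one skip step on the right equals restarting the outer loop at r-1 (same fuel)
theorem checkLoop_stepR (x : Int) (arr : List Int) (fuel : Nat) (l r : Int) (h : l < r)
    (hxl : PySem.List.pyGet? arr l ≠ some x)
    (hx : PySem.List.pyGet? arr r = some x) :
    checkLoopGo x arr (fuel + 1) l r = checkLoopGo x arr (fuel + 1) l (r - 1) := by
  have hl0 : ∀ r' : Int, checkSkipL x arr l r' = l := fun r' =>
    checkSkipL_stop x arr l r' (by simp [hxl])
  have hsk : checkSkipR x arr l r = checkSkipR x arr l (r - 1) :=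
    checkSkipR_shift x arr l r h hx
  by_cases h2 : l < r - 1
  · rw [checkLoopGo, checkLoopGo, if_pos h, if_pos h2]
    dsimp only
    rw [hl0, hl0, hsk]
  · have hr : r = l + 1 := by omega
    subst hr
    rw [checkLoopGo, if_pos h, checkLoopGo_true x arr _ l (l + 1 - 1) (by omega)]
    dsimp only
    rw [hl0]
    have hr' : checkSkipR x arr l (l + 1) = l := by
      rw [hsk]
      have : l + 1 - 1 = l := by omega
      rw [this, checkSkipR_stop x arr l l (by simp)]
    rw [hr']
    simp [checkLoopGo_true x arr fuel (l + 1) (l - 1) (by omega)]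

-- both ends non-x: compare and recurse (consuming one unit of fuel)
theorem checkLoop_stepM (x : Int) (arr : List Int) (fuel : Nat) (l r : Int) (h : l < r)
    (hxl : PySem.List.pyGet? arr l ≠ some x)
    (hxr : PySem.List.pyGet? arr r ≠ some x) :
    checkLoopGo x arr (fuel + 1) l r =
      if PySem.List.pyGet? arr l ≠ PySem.List.pyGet? arr r then false
      else checkLoopGo x arr fuel (l + 1) (r - 1) := by
  rw [checkLoopGo, if_pos h]
  dsimp only
  rw [checkSkipL_stop x arr l r (by simp [hxl])]
  rw [checkSkipR_stop x arr l r (by simp [hxr])]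

theorem pv_base (x : Int) (arr : List Int) (fuel : Nat) (l r : Nat)
    (h : ¬ l < r) :
    checkLoopGo x arr fuel l r
      = decide ((pvSeg arr l r).filter (fun v => decide (v ≠ x))
          = ((pvSeg arr l r).filter (fun v => decide (v ≠ x))).reverse) := by
  rw [checkLoopGo_true x arr fuel l r (by exact_mod_cast h)]
  by_cases heq : l = r
  · subst heq
    by_cases hl : l < arr.length
    · rw [pvSeg_cons arr l l (le_refl l) hl]
      have : pvSeg arr (l + 1) l = [] := by
        unfold pvSeg
        have : l + 1 - (l + 1) = 0 := by omega
        simp [this]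
      rw [this]
      by_cases hx : arr[l] = x <;> simp [hx]
    · have : pvSeg arr l l = [] := by
        unfold pvSeg
        rw [List.drop_eq_nil_of_le (by omega)]
        simp
      simp [this]
  · have : pvSeg arr l r = [] := by
      unfold pvSeg
      have : r + 1 - l = 0 := by omega
      simp [this]
    simp [this]

theorem pv_main (x : Int) (arr : List Int) :
    ∀ (n : Nat), ∀ (l r : Nat) (fuel : Nat), r - l ≤ n → r - l < fuel → r < arr.length →
    checkLoopGo x arr fuel l r
      = decide ((pvSeg arr l r).filter (fun v => decide (v ≠ x))
          = ((pvSeg arr l r).filter (fun v => decide (v ≠ x))).reverse) := by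
  intro n
  induction n with
  | zero =>
    intro l r fuel hn hfuel hr
    exact pv_base x arr fuel l r (by omega)
  | succ n IH =>
    intro l r fuel hn hfuel hr
    by_cases hlr : l < r
    · obtain ⟨f, rfl⟩ : ∃ f, fuel = f + 1 := ⟨fuel - 1, by omega⟩
      have hl : l < arr.length := by omega
      have hilr : (l : Int) < (r : Int) := by exact_mod_cast hlr
      have hgl : PySem.List.pyGet? arr (l : Int) = some arr[l] := by
        simp [PySem.List.pyGet?_natCast, List.getElem?_eq_getElem hl]
      have hgr : PySem.List.pyGet? arr (r : Int) = some arr[r] := by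
        simp [PySem.List.pyGet?_natCast, List.getElem?_eq_getElem hr]
      by_cases hax : arr[l] = x
      · -- left end is x: skip it; the filter drops it
        rw [checkLoop_stepL x arr f (l : Int) (r : Int) hilr (by rw [hgl, hax])]
        have hc : ((l : Int) + 1) = ((l + 1 : Nat) : Int) := by push_cast; ring
        rw [hc, IH (l + 1) r (f + 1) (by omega) (by omega) hr]
        rw [pvSeg_cons arr l r (by omega) hl]
        simp [hax]
      · by_cases hbx : arr[r] = x
        · -- right end is x: skip it; the filter drops it
          rw [checkLoop_stepR x arr f (l : Int) (r : Int) hilr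
            (by rw [hgl]; simp [hax]) (by rw [hgr, hbx])]
          have hc : ((r : Int) - 1) = ((r - 1 : Nat) : Int) := by
            have : 1 ≤ r := by omega
            push_cast [this]; ring
          rw [hc, IH l (r - 1) (f + 1) (by omega) (by omega) (by omega)]
          rw [pvSeg_concat arr l r hlr hr]
          simp [List.filter_append, hbx]
        · -- both ends non-x: compare, recurse inward
          rw [checkLoop_stepM x arr f (l : Int) (r : Int) hilr
            (by rw [hgl]; simp [hax]) (by rw [hgr]; simp [hbx])]
          rw [hgl, hgr]
          have hseg : pvSeg arr l r
              = arr[l] :: (pvSeg arr (l + 1) (r - 1) ++ [arr[r]]) := by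
            rw [pvSeg_cons arr l r (by omega) hl]
            by_cases h2 : l + 1 < r
            · rw [pvSeg_concat arr (l + 1) r h2 hr]
            · have : r = l + 1 := by omega
              subst this
              congr 1
              have e1 : pvSeg arr (l + 1) (l + 1 - 1) = [] := by
                unfold pvSeg
                have : l + 1 - 1 + 1 - (l + 1) = 0 := by omega
                simp [this]
              rw [e1]
              rw [pvSeg_cons arr (l + 1) (l + 1) (le_refl _) hr]
              have e2 : pvSeg arr (l + 1 + 1) (l + 1) = [] := by
                unfold pvSeg
                have : l + 1 + 1 - (l + 1 + 1) = 0 := by omega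
                simp [this]
              rw [e2]
              simp
          rw [hseg]
          have hfilter :
              List.filter (fun v => decide (v ≠ x))
                  (arr[l] :: (pvSeg arr (l + 1) (r - 1) ++ [arr[r]]))
                = arr[l] ::
                    (List.filter (fun v => decide (v ≠ x)) (pvSeg arr (l + 1) (r - 1))
                      ++ [arr[r]]) := by
            simp [List.filter_append, hax, hbx]
          rw [hfilter, pv_pal_sandwich]
          by_cases hab : arr[l] = arr[r]
          · have hcond : ¬ (some arr[l] ≠ some arr[r]) := by simp [hab]
            rw [if_neg hcond]
            have hc1 : ((l : Int) + 1) = ((l + 1 : Nat) : Int) := by push_cast; ring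
            have hc2 : ((r : Int) - 1) = ((r - 1 : Nat) : Int) := by
              have : 1 ≤ r := by omega
              push_cast [this]; ring
            rw [hc1, hc2, IH (l + 1) (r - 1) f (by omega) (by omega) (by omega)]
            simp [hab]
          · rw [if_pos (by simp [hab])]
            simp [hab]
    · exact pv_base x arr fuel l r hlr

-- ===== VERDICT (by name: the statement is the Claim_ definition above) =====
theorem check_spec : Claim_equal_check := by
  intro x arr _
  unfold Spec_check check check_alt
  rcases arr with _ | ⟨a, t⟩
  · simp [checkLoopGo]
  · set arr := a :: t with harr
    have hlen : 1 ≤ arr.length := by simp [harr]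
    have hc : ((arr.length : Int) - 1) = ((arr.length - 1 : Nat) : Int) := by
      push_cast [hlen]; ring
    have h0 : ((0 : Nat) : Int) = (0 : Int) := rfl
    rw [hc, ← h0,
      pv_main x arr (arr.length - 1) 0 (arr.length - 1) arr.length (le_refl _)
        (by omega) (by omega)]
    have : pvSeg arr 0 (arr.length - 1) = arr := by
      unfold pvSeg
      have : arr.length - 1 + 1 - 0 = arr.length := by omega
      simp [this]
    rw [this]
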